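-- pv_equiv track=rewrite | github.com/Ppa-Dun-project/PPA-DUN-be | be/draft.py | find_available_slot_index_with_occupied
-- ===== SOURCE A (Python) =====
-- from typing import Dict, List, Literal, Optional, Set, Tuple
--
-- DraftPosition = Literal["C", "1B", "2B", "3B", "SS", "OF", "UTIL", "SP", "RP", "BENCH"]
--
-- def find_available_slot_index_with_occupied(
--     desired_pos: DraftPosition,
--     slot_template: List[DraftPosition],
--     occupied: Set[int],
-- ) -> int:
--     # Position rule removed: assign the first open slot regardless of player position.
--     for i, _slot in enumerate(slot_template):
--         if i in occupied:
--             continue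
--         return i
--     return -1
-- ===== SOURCE B (Python) =====
-- def find_available_slot_index_with_occupied(desired_pos, slot_template, occupied):
--     free = set(range(len(slot_template))) - occupied
--     return min(free, default=-1)
-- ===== Notes on version B (the rewrite author's own statement) =====
-- stated objective: idiomatic
-- what changed: Replaces A's early-return index scan with a skip branch by a build-then-reduce shape: construct the free-index set as set(range(len(slot_template))) - occupied and return min(free, default=-1).
import Mathlib
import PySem

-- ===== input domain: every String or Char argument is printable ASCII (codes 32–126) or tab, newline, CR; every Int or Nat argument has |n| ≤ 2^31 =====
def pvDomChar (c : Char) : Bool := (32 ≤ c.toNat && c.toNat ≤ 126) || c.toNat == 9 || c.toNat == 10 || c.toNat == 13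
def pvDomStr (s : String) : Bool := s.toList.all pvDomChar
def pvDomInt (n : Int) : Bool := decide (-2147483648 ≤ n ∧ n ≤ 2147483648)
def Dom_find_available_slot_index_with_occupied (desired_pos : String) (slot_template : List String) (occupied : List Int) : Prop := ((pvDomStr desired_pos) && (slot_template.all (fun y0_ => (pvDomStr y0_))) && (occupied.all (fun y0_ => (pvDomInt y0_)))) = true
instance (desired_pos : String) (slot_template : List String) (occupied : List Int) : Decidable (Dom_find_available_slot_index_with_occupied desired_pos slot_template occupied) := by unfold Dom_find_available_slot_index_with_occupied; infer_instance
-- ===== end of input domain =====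

-- B replaces A's early-return scan-with-skip loop by a build-then-reduce shape:
-- free indices = range minus occupied, answer = min with default -1 (objective: idiomatic).

-- ===== PORT A =====
-- the 'for i, _slot in enumerate(...)' loop with early return
def pvScanA (occupied : List Int) : List (Int × String) → Int
  | [] => -1
  | (i, _slot) :: rest =>
      if occupied.contains i then pvScanA occupied rest else i

def find_available_slot_index_with_occupied (desired_pos : String) (slot_template : List String) (occupied : List Int) : Int :=
  pvScanA occupied (PySem.List.enumerate slot_template)

-- ===== PORT B =====
-- set(range(n)) - occupied: range(n) is duplicate-free, so the set difference is a filter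
def find_available_slot_index_with_occupied_alt (desired_pos : String) (slot_template : List String) (occupied : List Int) : Int :=
  let free := (PySem.List.pyRange 0 (slot_template.length) 1).filter (fun i => ! occupied.contains i)
  (PySem.List.min? free (fun x => x)).getD (-1)

-- ===== PRECONDITION & SPEC =====
def Spec_find_available_slot_index_with_occupied (desired_pos : String) (slot_template : List String) (occupied : List Int) (out : Int) : Prop := out = find_available_slot_index_with_occupied_alt desired_pos slot_template occupied
instance (desired_pos : String) (slot_template : List String) (occupied : List Int) (out : Int) : Decidable (Spec_find_available_slot_index_with_occupied desired_pos slot_template occupied out) := by unfold Spec_find_available_slot_index_with_occupied; infer_instance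

-- ===== CLAIM (what is proved, stated in full; the proofs are below) =====
def Claim_equal_find_available_slot_index_with_occupied : Prop := ∀ (desired_pos : String) (slot_template : List String) (occupied : List Int), Dom_find_available_slot_index_with_occupied desired_pos slot_template occupied → Spec_find_available_slot_index_with_occupied desired_pos slot_template occupied (find_available_slot_index_with_occupied desired_pos slot_template occupied)

-- ===== LEMMAS AND PROOFS =====

-- A's scan over int indices only (the string component is ignored)
def pvScanR (occupied : List Int) : List Int → Int
  | [] => -1
  | i :: rest => if occupied.contains i then pvScanR occupied rest else i

lemma pvScanA_eq_scanR (occ : List Int) (l : List (Int × String)) :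
    pvScanA occ l = pvScanR occ (l.map (·.1)) := by
  induction l with
  | nil => rfl
  | cons p rest ih =>
      obtain ⟨i, s⟩ := p
      simp [pvScanA, pvScanR, ih]

-- the scan is the head of the filtered list (default -1)
lemma pvScanR_eq_headD (occ : List Int) (l : List Int) :
    pvScanR occ l = (l.filter (fun i => ! occ.contains i)).headD (-1) := by
  induction l with
  | nil => rfl
  | cons i rest ih =>
      by_cases h : i ∈ occ
      · simp [pvScanR, h, ih]
      · simp [pvScanR, h]

lemma foldl_min_of_le (x : Int) (t : List Int) (h : ∀ y ∈ t, x ≤ y) :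
    t.foldl min x = x := by
  induction t with
  | nil => rfl
  | cons y rest ih =>
      have hx : min x y = x := min_eq_left (h y (by simp))
      simp only [List.foldl, hx]
      exact ih (fun z hz => h z (by simp [hz]))

-- min of an ascending-sorted list is its head
lemma min?_sorted_headD (l : List Int) (hs : l.Pairwise (· < ·)) :
    (PySem.List.min? l (fun x => x)).getD (-1) = l.headD (-1) := by
  cases l with
  | nil => rfl
  | cons x t =>
      rw [PySem.List.min?_id_cons]
      have hx : ∀ y ∈ t, x ≤ y := fun y hy => le_of_lt ((List.pairwise_cons.mp hs).1 y hy)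
      simp [foldl_min_of_le x t hx]

-- ===== VERDICT (by name: the statement is the Claim_ definition above) =====
theorem find_available_slot_index_with_occupied_spec : Claim_equal_find_available_slot_index_with_occupied := by
  intro desired_pos slot_template occupied _
  unfold Spec_find_available_slot_index_with_occupied
  unfold find_available_slot_index_with_occupied find_available_slot_index_with_occupied_alt
  rw [pvScanA_eq_scanR, PySem.List.map_fst_enumerate, pvScanR_eq_headD]
  rw [min?_sorted_headD]
  · simp
  · exact List.Pairwise.filter _ (PySem.List.pairwise_lt_pyRange_one 0 _)
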